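-- pv_equiv track=rewrite | github.com/GDevlin/Operations-Research-Simulation | CA A - Simulation/Random_Number_Generator.py | mult_congru
-- ===== SOURCE A (Python) =====
-- def mult_congru(num_count, num_integers, seed, a, b, m):
-- 	while num_integers >  0:
-- 		rand_num = ((a * seed) + b) % m
-- 		if str(rand_num) in num_count:
-- 			num_count[str(rand_num)] += 1
-- 		else:
-- 			num_count[str(rand_num)] = 1
-- 		seed = rand_num
-- 		num_integers -= 1
-- 	return num_count
-- ===== SOURCE B (Python) =====
-- def mult_congru(num_count, num_integers, seed, a, b, m):
--     # Cycle detection: the seed sequence is eventually periodic, so walk it only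
--     # until the first repeated value, count that prefix directly, then add the
--     # full cycles arithmetically and the leftover partial cycle.
--     # NOTE: like the original, this mutates and returns num_count.
--     n = num_integers
--     if n <= 0:
--         return num_count
--     seen = {}
--     trail = []
--     s = seed
--     while len(trail) < n:
--         s = (a * s + b) % m
--         if s in seen:
--             break
--         seen[s] = len(trail)
--         trail.append(s)
--     for v in trail:
--         k = str(v)
--         num_count[k] = num_count.get(k, 0) + 1
--     done = len(trail)
--     if done < n:
--         j = seen.get(s, 0)
--         cycle = trail[j:]
--         rest = n - done
--         full = rest // len(cycle)
--         rem = rest % len(cycle)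
--         cnt = {}
--         for v in cycle:
--             cnt[v] = cnt.get(v, 0) + 1
--         for v, c in cnt.items():
--             k = str(v)
--             num_count[k] = num_count.get(k, 0) + full * c
--         for v in cycle[:rem]:
--             k = str(v)
--             num_count[k] = num_count.get(k, 0) + 1
--     return num_count
-- ===== Notes on version B (the rewrite author's own statement) =====
-- stated objective: faster
-- what changed: Instead of iterating the LCG num_integers times, B walks the seed sequence only until the first repeated value (the sequence is eventually periodic), counts that prefix directly, then adds the contribution of the full cycles arithmetically (full * per-cycle counts) plus the leftover partial cycle.
import Mathlib
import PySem

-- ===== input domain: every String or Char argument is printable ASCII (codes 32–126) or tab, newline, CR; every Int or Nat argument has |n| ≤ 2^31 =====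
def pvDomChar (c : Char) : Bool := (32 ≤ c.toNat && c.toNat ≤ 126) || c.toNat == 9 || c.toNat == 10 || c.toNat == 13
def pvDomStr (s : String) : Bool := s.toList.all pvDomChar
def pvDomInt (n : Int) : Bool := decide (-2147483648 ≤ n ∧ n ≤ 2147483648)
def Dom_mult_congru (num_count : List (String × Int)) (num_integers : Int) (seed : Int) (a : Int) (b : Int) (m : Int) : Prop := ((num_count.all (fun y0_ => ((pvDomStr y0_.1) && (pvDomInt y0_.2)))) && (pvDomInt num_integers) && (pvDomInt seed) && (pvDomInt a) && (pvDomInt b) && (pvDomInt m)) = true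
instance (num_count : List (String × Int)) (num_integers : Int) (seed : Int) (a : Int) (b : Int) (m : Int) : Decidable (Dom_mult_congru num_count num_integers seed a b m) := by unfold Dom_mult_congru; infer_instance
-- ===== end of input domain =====

-- B replaces A's O(num_integers) LCG loop by cycle detection: it walks the seed sequence
-- only until its first repeated value and adds the full cycles arithmetically (faster when
-- the period is shorter than num_integers). Like A, the Python B mutates and returns
-- num_count; the equivalence proved here is about the returned value.

-- ===== PORT A =====
-- the while-loop of A: one iteration per remaining num_integers (fuel = num_integers.toNat)
def pvLoopA (d : PySem.Dict String Int) (fuel : Nat) (seed a b m : Int) : PySem.Dict String Int :=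
  match fuel with
  | 0 => d
  | Nat.succ f =>
    let rand_num := PySem.Int.mod (a * seed + b) m
    let key := PySem.Int.toStr rand_num
    let d' := if d.contains key then d.insert key (d.getD key 0 + 1) else d.insert key 1
    pvLoopA d' f rand_num a b m

def mult_congru (num_count : List (String × Int)) (num_integers : Int) (seed : Int) (a : Int) (b : Int) (m : Int) : List (String × Int) :=
  (pvLoopA (PySem.Dict.mk num_count) num_integers.toNat seed a b m).items

-- ===== PORT B =====
-- the `while len(trail) < n` loop of B: the trail grows by exactly one element per
-- iteration from length 0, so fuel = n.toNat bounds it exactly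
def pvWalkB (fuel : Nat) (seen : PySem.Dict Int Int) (trail : List Int) (s a b m : Int) :
    List Int × PySem.Dict Int Int × Int :=
  match fuel with
  | 0 => (trail, seen, s)
  | Nat.succ f =>
    let s' := PySem.Int.mod (a * s + b) m
    if seen.contains s' then (trail, seen, s')
    else pvWalkB f (seen.insert s' (trail.length : Int)) (trail ++ [s']) s' a b m

def mult_congru_alt (num_count : List (String × Int)) (num_integers : Int) (seed : Int) (a : Int) (b : Int) (m : Int) : List (String × Int) :=
  if num_integers ≤ 0 then num_count else
  let res := pvWalkB num_integers.toNat PySem.Dict.empty [] seed a b m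
  let trail := res.1
  let seen := res.2.1
  let s := res.2.2
  let d1 := trail.foldl
    (fun d v => d.insert (PySem.Int.toStr v) (d.getD (PySem.Int.toStr v) 0 + 1))
    (PySem.Dict.mk num_count)
  let done : Int := trail.length
  if done < num_integers then
    let j := seen.getD s 0
    let cycle := PySem.List.slice trail (some j) none
    let rest := num_integers - done
    let full := PySem.Int.floordiv rest (cycle.length : Int)
    let rem := PySem.Int.mod rest (cycle.length : Int)
    let cnt := cycle.foldl (fun d v => d.insert v (d.getD v 0 + 1)) (PySem.Dict.empty : PySem.Dict Int Int)
    let d2 := cnt.items.foldl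
      (fun d p => d.insert (PySem.Int.toStr p.1) (d.getD (PySem.Int.toStr p.1) 0 + full * p.2)) d1
    let d3 := (PySem.List.slice cycle none (some rem)).foldl
      (fun d v => d.insert (PySem.Int.toStr v) (d.getD (PySem.Int.toStr v) 0 + 1)) d2
    d3.items
  else d1.items

-- ===== PRECONDITION & SPEC =====
-- Pre_ excludes (a) m = 0 with a positive count, where the Python A raises
-- ZeroDivisionError (and so does B), and (b) association lists with duplicate keys,
-- which encode no Python dict argument (A receives a real dict, and a dict cannot
-- contain a duplicate key).
def Pre_mult_congru (num_count : List (String × Int)) (num_integers : Int) (seed : Int) (a : Int) (b : Int) (m : Int) : Prop :=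
  (num_integers ≤ 0 ∨ m ≠ 0) ∧ (num_count.map Prod.fst).Nodup
instance (num_count : List (String × Int)) (num_integers : Int) (seed : Int) (a : Int) (b : Int) (m : Int) : Decidable (Pre_mult_congru num_count num_integers seed a b m) := by unfold Pre_mult_congru; infer_instance

def pvWitness_mult_congru : (List (String × Int)) × Int × Int × Int × Int × Int :=
  ([("1", 2)], 5, 3, 2, 1, 10)

def Spec_mult_congru (num_count : List (String × Int)) (num_integers : Int) (seed : Int) (a : Int) (b : Int) (m : Int) (out : List (String × Int)) : Prop := out = mult_congru_alt num_count num_integers seed a b m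
instance (num_count : List (String × Int)) (num_integers : Int) (seed : Int) (a : Int) (b : Int) (m : Int) (out : List (String × Int)) : Decidable (Spec_mult_congru num_count num_integers seed a b m out) := by unfold Spec_mult_congru; infer_instance

-- ===== CLAIM (what is proved, stated in full; the proofs are below) =====
def Claim_equal_mult_congru : Prop := ∀ (num_count : List (String × Int)) (num_integers : Int) (seed : Int) (a : Int) (b : Int) (m : Int), Dom_mult_congru num_count num_integers seed a b m → Pre_mult_congru num_count num_integers seed a b m → Spec_mult_congru num_count num_integers seed a b m (mult_congru num_count num_integers seed a b m)

-- ===== LEMMAS AND PROOFS =====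

-- the LCG value stream and the iterated seed
def pvGen (a b m : Int) : Nat → Int → List Int
  | 0, _ => []
  | Nat.succ k, s => PySem.Int.mod (a * s + b) m :: pvGen a b m k (PySem.Int.mod (a * s + b) m)

def pvIter (a b m : Int) : Nat → Int → Int
  | 0, s => s
  | Nat.succ k, s => pvIter a b m k (PySem.Int.mod (a * s + b) m)

theorem pvGen_length (a b m : Int) (k : Nat) (s : Int) : (pvGen a b m k s).length = k := by
  induction k generalizing s with
  | zero => rfl
  | succ k ih => simp [pvGen, ih]

theorem pvGen_add (a b m : Int) (u v : Nat) (s : Int) :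
    pvGen a b m (u + v) s = pvGen a b m u s ++ pvGen a b m v (pvIter a b m u s) := by
  induction u generalizing s with
  | zero => simp [pvGen, pvIter]
  | succ u ih =>
    have : u + 1 + v = (u + v) + 1 := by omega
    rw [this]
    simp only [pvGen, pvIter, ih]
    rfl

theorem pvIter_succ_right (a b m : Int) (k : Nat) (s : Int) :
    pvIter a b m (k + 1) s = PySem.Int.mod (a * pvIter a b m k s + b) m := by
  induction k generalizing s with
  | zero => rfl
  | succ k ih => simp only [pvIter]; exact ih _

theorem pvIter_add (a b m : Int) (u v : Nat) (s : Int) :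
    pvIter a b m (u + v) s = pvIter a b m v (pvIter a b m u s) := by
  induction u generalizing s with
  | zero => simp [pvIter]
  | succ u ih =>
    have : u + 1 + v = (u + v) + 1 := by omega
    rw [this]
    simp only [pvIter]
    exact ih _

theorem pvGen_congr (a b m : Int) (k : Nat) (x y : Int)
    (h : PySem.Int.mod (a * x + b) m = PySem.Int.mod (a * y + b) m) :
    pvGen a b m k x = pvGen a b m k y := by
  cases k with
  | zero => rfl
  | succ k => simp only [pvGen, h]

theorem pvGen_take (a b m : Int) (k v : Nat) (s : Int) :
    (pvGen a b m k s).take v = pvGen a b m (min v k) s := by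
  induction k generalizing s v with
  | zero => simp [pvGen]
  | succ k ih =>
    cases v with
    | zero => simp [pvGen]
    | succ v =>
      simp only [pvGen, List.take_succ_cons, ih]
      rw [Nat.succ_min_succ]
      rfl

theorem pvGen_getElem? (a b m : Int) (k j : Nat) (s : Int) (h : j < k) :
    (pvGen a b m k s)[j]? = some (pvIter a b m (j + 1) s) := by
  have hk : k = j + (k - j) := by omega
  rw [hk, pvGen_add]
  have hj : (pvGen a b m j s).length = j := pvGen_length a b m j s
  obtain ⟨w, hw⟩ : ∃ w, k - j = w + 1 := ⟨k - j - 1, by omega⟩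
  rw [hw]
  simp only [pvGen]
  rw [List.getElem?_append_right (by omega)]
  simp [hj, pvIter_succ_right]

theorem pvGen_rep (a b m : Int) (p : Nat) (u : Int)
    (h : PySem.Int.mod (a * pvIter a b m p u + b) m = PySem.Int.mod (a * u + b) m) :
    ∀ (q v : Nat), pvGen a b m (q * p + v) u
      = (List.replicate q (pvGen a b m p u)).flatten ++ pvGen a b m v u := by
  intro q
  induction q with
  | zero => simp
  | succ q ih =>
    intro v
    have : (q + 1) * p + v = p + (q * p + v) := by ring
    rw [this, pvGen_add]
    rw [pvGen_congr a b m _ _ u h, ih v]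
    simp [List.replicate_succ]

theorem pvLoopA_eq_foldl (a b m : Int) : ∀ (fuel : Nat) (d : PySem.Dict String Int) (s : Int),
    pvLoopA d fuel s a b m = (pvGen a b m fuel s).foldl
      (fun d v => d.insert (PySem.Int.toStr v) (d.getD (PySem.Int.toStr v) 0 + 1)) d := by
  intro fuel
  induction fuel with
  | zero => intro d s; rfl
  | succ f ih =>
    intro d s
    simp only [pvLoopA, pvGen, List.foldl_cons]
    rw [ih]
    congr 1
    by_cases hc : d.contains (PySem.Int.toStr (PySem.Int.mod (a * s + b) m)) = true
    · simp [hc]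
    · have h0 : d.getD (PySem.Int.toStr (PySem.Int.mod (a * s + b) m)) 0 = 0 :=
        PySem.Dict.getD_of_not_contains d 0 (by simpa using hc)
      simp [hc, h0]

-- bump-fold over keys already present rewrites the items list pointwise
theorem pvFold_insert_items {β : Type} (g : β → String) (w : β → Int)
    (xs : List β) (d : PySem.Dict String Int)
    (hnd : d.keys.Nodup) (hc : ∀ x ∈ xs, d.contains (g x) = true) :
    (xs.foldl (fun d x => d.insert (g x) (d.getD (g x) 0 + w x)) d).items
      = d.items.map (fun p => (p.1, p.2 + ((xs.filter (fun x => g x == p.1)).map w).sum)) := by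
  induction xs generalizing d with
  | nil => simp
  | cons x xs ih =>
    simp only [List.foldl_cons]
    have hcx : d.contains (g x) = true := hc x (List.mem_cons_self)
    set d' := d.insert (g x) (d.getD (g x) 0 + w x) with hd'
    have hkeys : d'.keys = d.keys := PySem.Dict.keys_insert_of_contains d _ hcx
    have hnd' : d'.keys.Nodup := hkeys ▸ hnd
    have hc' : ∀ y ∈ xs, d'.contains (g y) = true := by
      intro y hy
      rw [PySem.Dict.contains_insert]
      simp [hc y (List.mem_cons_of_mem _ hy)]
    rw [ih d' hnd' hc']
    rw [hd', PySem.Dict.items_insert_of_contains d _ hcx, List.map_map]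
    apply List.map_congr_left
    intro p hp
    simp only [Function.comp_apply]
    by_cases hpk : p.1 = g x
    · have hval : d.getD p.1 0 = p.2 := PySem.Dict.getD_of_mem_items d hp hnd 0
      rw [if_pos (by simp [hpk])]
      have h2 : (g x == p.1) = true := by simp [hpk]
      simp only [List.filter_cons, h2, if_true, List.map_cons, List.sum_cons]
      rw [← hpk, hval]
      simp [add_assoc, hpk]
    · have h1 : (p.1 == g x) = false := by simpa using hpk
      have h2 : (g x == p.1) = false := by simpa using fun h => hpk h.symm
      rw [if_neg (by simp [h1])]
      simp [h2]

-- per-key total over distinct representatives equals the count in the mapped list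
theorem pvSum_counts (g : Int → String) (S : List Int) (hS : S.Nodup) :
    ∀ (c : List Int), (∀ x ∈ c, x ∈ S) → ∀ (k : String),
      ((S.filter (fun v => g v == k)).map (fun v => (c.count v : Int))).sum
        = ((c.map g).count k : Int) := by
  intro c
  induction c with
  | nil => intro _ k; simp
  | cons x c ih =>
    intro hmem k
    have hx : x ∈ S := hmem x List.mem_cons_self
    have hsum : ((S.filter (fun v => g v == k)).map (fun v => ((x :: c).count v : Int))).sum
        = ((S.filter (fun v => g v == k)).map (fun v => (c.count v : Int))).sum
          + ((S.filter (fun v => g v == k)).map (fun v => (if v == x then (1:Int) else 0))).sum := by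
      rw [← List.sum_map_add]
      apply congrArg
      apply List.map_congr_left
      intro v hv
      rw [List.count_cons]
      by_cases hvx : v = x
      · simp [hvx]
      · have h2 : (x == v) = false := by simpa using fun h => hvx h.symm
        simp [h2, hvx]
    rw [hsum, ih (fun y hy => hmem y (List.mem_cons_of_mem _ hy)) k]
    have hcount : ∀ (T : List Int), T.Nodup →
        ((T.filter (fun v => g v == k)).map (fun v => (if v == x then (1:Int) else 0))).sum
          = (if x ∈ T ∧ g x = k then (1:Int) else 0) := by
      intro T hT
      induction T with
      | nil => simp
      | cons y T ihT =>
        have hTnd : T.Nodup := hT.of_cons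
        have hyT : y ∉ T := by simp at hT; exact hT.1
        rw [List.filter_cons]
        by_cases hky : g y = k
        · rw [if_pos (by simp [hky])]
          simp only [List.map_cons, List.sum_cons, ihT hTnd]
          by_cases hxy : x = y
          · have hxT : x ∉ T := hxy ▸ hyT
            simp [hxy, hky, hyT]
          · have : (y == x) = false := by simpa using fun h => hxy h.symm
            simp only [this, Bool.false_eq_true, if_false, zero_add]
            by_cases hxT : x ∈ T
            · simp [hxT, List.mem_cons, hxy]
            · simp [hxT, List.mem_cons, hxy]
        · rw [if_neg (by simpa using hky)]
          rw [ihT hTnd]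
          by_cases hxy : x = y
          · subst hxy
            simp [hky]
          · simp [List.mem_cons, hxy]
    rw [hcount S hS]
    rw [List.map_cons, List.count_cons]
    by_cases hgk : g x = k
    · simp [hgk, hx]
    · simp [hgk]

-- the invariant of B's detection loop: every recorded seed is at its recorded trail index
def pvInv (seen : PySem.Dict Int Int) (trail : List Int) : Prop :=
  ∀ x, seen.contains x = true →
    ∃ jx : Nat, jx < trail.length ∧ seen.getD x 0 = (jx : Int) ∧ trail[jx]? = some x

theorem pvWalkB_spec (a b m : Int) : ∀ (fuel : Nat) (seen : PySem.Dict Int Int)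
    (trail : List Int) (s : Int), pvInv seen trail →
    ∃ k : Nat, k ≤ fuel ∧
      (pvWalkB fuel seen trail s a b m).1 = trail ++ pvGen a b m k s ∧
      pvInv (pvWalkB fuel seen trail s a b m).2.1 (pvWalkB fuel seen trail s a b m).1 ∧
      ((k = fuel ∧ (pvWalkB fuel seen trail s a b m).2.2 = pvIter a b m k s) ∨
       (k < fuel ∧ (pvWalkB fuel seen trail s a b m).2.2 = pvIter a b m (k + 1) s ∧
        (pvWalkB fuel seen trail s a b m).2.1.contains (pvWalkB fuel seen trail s a b m).2.2 = true)) := by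
  intro fuel
  induction fuel with
  | zero =>
    intro seen trail s hinv
    exact ⟨0, le_refl _, by simp [pvWalkB, pvGen], by simpa [pvWalkB] using hinv,
      Or.inl ⟨rfl, rfl⟩⟩
  | succ f ih =>
    intro seen trail s hinv
    by_cases hct : seen.contains (PySem.Int.mod (a * s + b) m) = true
    · refine ⟨0, by omega, ?_, ?_, Or.inr ⟨by omega, ?_, ?_⟩⟩
      · simp [pvWalkB, hct, pvGen]
      · simpa [pvWalkB, hct] using hinv
      · simp [pvWalkB, hct, pvIter]
      · simp [pvWalkB, hct]
    · have hinv' : pvInv (seen.insert (PySem.Int.mod (a * s + b) m) (trail.length : Int))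
          (trail ++ [PySem.Int.mod (a * s + b) m]) := by
        intro x hx
        rw [PySem.Dict.contains_insert] at hx
        by_cases hxs : x = PySem.Int.mod (a * s + b) m
        · refine ⟨trail.length, by simp, ?_, ?_⟩
          · rw [hxs, PySem.Dict.getD_insert_self]
          · rw [hxs]
            simp
        · have hx' : seen.contains x = true := by
            have : (x == PySem.Int.mod (a * s + b) m) = false := by simpa using hxs
            simpa [this] using hx
          obtain ⟨jx, hjx, hg, hget⟩ := hinv x hx'
          refine ⟨jx, by simp; omega, ?_, ?_⟩
          · rw [PySem.Dict.getD_insert_of_ne (hne := hxs), hg]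
          · rw [List.getElem?_append_left hjx]
            exact hget
      obtain ⟨k, hk, h1, h2, h3⟩ := ih _ _ _ hinv'
      have hw : pvWalkB (f + 1) seen trail s a b m
          = pvWalkB f (seen.insert (PySem.Int.mod (a * s + b) m) (trail.length : Int))
              (trail ++ [PySem.Int.mod (a * s + b) m]) (PySem.Int.mod (a * s + b) m) a b m := by
        simp [pvWalkB, hct]
      refine ⟨k + 1, by omega, ?_, ?_, ?_⟩
      · rw [hw, h1]
        simp [pvGen]
      · rw [hw]
        exact h2
      · rw [hw]
        rcases h3 with ⟨hkf, hs⟩ | ⟨hkf, hs, hc⟩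
        · exact Or.inl ⟨by omega, by rw [hs]; rfl⟩
        · exact Or.inr ⟨by omega, by rw [hs]; rfl, hc⟩

theorem pvCount_flatten_replicate (q : Nat) (l : List String) (k : String) :
    ((List.replicate q l).flatten).count k = q * l.count k := by
  rw [List.count_flatten, List.map_replicate]
  simp [List.sum_replicate]


theorem pvAlt_nobreak (num_count : List (String × Int)) (n seed a b m : Int)
    (trail : List Int) (seen : PySem.Dict Int Int) (s : Int)
    (hn : ¬ n ≤ 0)
    (hres : pvWalkB n.toNat PySem.Dict.empty [] seed a b m = (trail, seen, s))
    (hge : ¬ ((trail.length : Int) < n)) :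
    mult_congru_alt num_count n seed a b m
      = (trail.foldl (fun d v => d.insert (PySem.Int.toStr v) (d.getD (PySem.Int.toStr v) 0 + 1))
          (PySem.Dict.mk num_count)).items := by
  unfold mult_congru_alt
  simp only [hres]
  rw [if_neg hn, if_neg hge]

theorem pvAlt_break (num_count : List (String × Int)) (n seed a b m : Int)
    (trail : List Int) (seen : PySem.Dict Int Int) (s : Int)
    (hn : ¬ n ≤ 0)
    (hres : pvWalkB n.toNat PySem.Dict.empty [] seed a b m = (trail, seen, s))
    (hlt : ((trail.length : Int) < n))
    (cycle : List Int) (hcyc : cycle = PySem.List.slice trail (some (seen.getD s 0)) none)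
    (full rem : Int)
    (hfull : full = PySem.Int.floordiv (n - (trail.length : Int)) (cycle.length : Int))
    (hrem : rem = PySem.Int.mod (n - (trail.length : Int)) (cycle.length : Int)) :
    mult_congru_alt num_count n seed a b m =
      ((PySem.List.slice cycle none (some rem)).foldl
        (fun d v => d.insert (PySem.Int.toStr v) (d.getD (PySem.Int.toStr v) 0 + 1))
        (((cycle.foldl (fun d v => d.insert v (d.getD v 0 + 1)) (PySem.Dict.empty : PySem.Dict Int Int)).items).foldl
          (fun d p => d.insert (PySem.Int.toStr p.1) (d.getD (PySem.Int.toStr p.1) 0 + full * p.2))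
          (trail.foldl (fun d v => d.insert (PySem.Int.toStr v) (d.getD (PySem.Int.toStr v) 0 + 1))
            (PySem.Dict.mk num_count)))).items := by
  subst hcyc; subst hfull; subst hrem
  unfold mult_congru_alt
  simp only [hres]
  rw [if_neg hn, if_pos hlt]

-- ===== VERDICT (by name: the statement is the Claim_ definition above) =====
theorem mult_congru_spec : Claim_equal_mult_congru := by
  intro num_count n seed a b m _hdom hpre
  unfold Spec_mult_congru
  obtain ⟨_, hnd0⟩ := hpre
  by_cases hn : n ≤ 0
  · unfold mult_congru mult_congru_alt
    rw [if_pos hn]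
    have h0 : n.toNat = 0 := by omega
    rw [h0]
    rfl
  · have hA : mult_congru num_count n seed a b m
        = ((pvGen a b m n.toNat seed).foldl
            (fun d v => d.insert (PySem.Int.toStr v) (d.getD (PySem.Int.toStr v) 0 + 1))
            (PySem.Dict.mk num_count)).items := by
      unfold mult_congru; rw [pvLoopA_eq_foldl]
    obtain ⟨k, hk, h1, h2, h3⟩ := pvWalkB_spec a b m n.toNat PySem.Dict.empty [] seed
      (by intro x hx; simp [PySem.Dict.contains_empty] at hx)
    rw [List.nil_append] at h1
    have hres : pvWalkB n.toNat PySem.Dict.empty [] seed a b m =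
        ((pvWalkB n.toNat PySem.Dict.empty [] seed a b m).1,
         (pvWalkB n.toNat PySem.Dict.empty [] seed a b m).2.1,
         (pvWalkB n.toNat PySem.Dict.empty [] seed a b m).2.2) := rfl
    set R := pvWalkB n.toNat PySem.Dict.empty [] seed a b m with hRdef
    have hNn : ((n.toNat : Int)) = n := Int.toNat_of_nonneg (by omega)
    have hnd1 : ((pvGen a b m k seed).foldl
        (fun d v => d.insert (PySem.Int.toStr v) (d.getD (PySem.Int.toStr v) 0 + 1))
        (PySem.Dict.mk num_count)).keys.Nodup := by
      refine PySem.Dict.nodup_keys_foldl_insert_key (pvGen a b m k seed) PySem.Int.toStr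
        (fun d v => d.getD (PySem.Int.toStr v) 0 + 1) (PySem.Dict.mk num_count) ?_
      simpa [PySem.Dict.keys] using hnd0
    rcases h3 with ⟨hkN, hs⟩ | ⟨hkN, hs, hcont⟩
    · -- the walk never hit a repeated value: B counted the whole stream directly
      have hlen : ((R.1.length : Int)) = n := by rw [h1, pvGen_length, hkN, hNn]
      rw [pvAlt_nobreak num_count n seed a b m R.1 R.2.1 R.2.2 hn hres (by omega)]
      rw [hA, h1, hkN]
    · -- the walk stopped at the first repeated value
      obtain ⟨j, hjlen, hgD, hget⟩ := h2 R.2.2 hcont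
      have hlen1 : R.1.length = k := by rw [h1, pvGen_length]
      have hjk : j < k := by omega
      have hltn : ((R.1.length : Int)) < n := by
        rw [hlen1, ← hNn]
        exact_mod_cast hkN
      -- names
      set u := pvIter a b m j seed with hu
      set p := k - j with hp
      set c := pvGen a b m p u with hc
      set r := n.toNat - k with hr
      set D0 := (PySem.Dict.mk num_count : PySem.Dict String Int) with hD0
      -- trail[j] is the repeated value
      rw [h1, pvGen_getElem? a b m k j seed hjk] at hget
      have hIJ : pvIter a b m (j + 1) seed = pvIter a b m (k + 1) seed := by
        rw [Option.some_inj] at hget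
        rw [hget, hs]
      have hfu : pvIter a b m (j + 1) seed = PySem.Int.mod (a * u + b) m := by
        rw [pvIter_add a b m j 1 seed]
        rfl
      -- closing the cycle
      have hper : PySem.Int.mod (a * pvIter a b m p u + b) m = PySem.Int.mod (a * u + b) m := by
        rw [← pvIter_succ_right, ← pvIter_add a b m j (p + 1) seed]
        have : j + (p + 1) = k + 1 := by omega
        rw [this, ← hIJ, hfu]
      -- the trail splits off the cycle
      have hsplit : pvGen a b m k seed = pvGen a b m j seed ++ c := by
        rw [hc, hu, ← pvGen_add]
        congr 1
        omega
      have hdrop : (pvGen a b m k seed).drop j = c := by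
        rw [hsplit]
        exact List.drop_left' (pvGen_length a b m j seed)
      have hcyc0 : PySem.List.slice R.1 (some (R.2.1.getD R.2.2 0)) none = c := by
        rw [hgD, PySem.List.slice_from_natCast, h1, hdrop]
      -- the remaining stream is the cycle repeated
      have hstream : pvGen a b m n.toNat seed = pvGen a b m k seed ++ pvGen a b m r u := by
        have hNk : n.toNat = k + r := by omega
        rw [hNk, pvGen_add]
        congr 1
        apply pvGen_congr
        rw [← pvIter_succ_right, hIJ.symm, hfu]
      have hppos : 0 < p := by omega
      have hrdecomp : r = (r / p) * p + r % p := by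
        have h := Nat.div_add_mod r p
        rw [Nat.mul_comm] at h
        exact h.symm
      have hrep : pvGen a b m r u
          = (List.replicate (r / p) c).flatten ++ pvGen a b m (r % p) u := by
        conv_lhs => rw [hrdecomp]
        exact pvGen_rep a b m p u hper (r / p) (r % p)
      have hremlt : r % p < p := Nat.mod_lt r hppos
      have hrem_take : pvGen a b m (r % p) u = c.take (r % p) := by
        rw [hc, pvGen_take]
        congr 1
        omega
      -- Int-level arithmetic matches the Nat-level decomposition
      have hclen : c.length = p := pvGen_length a b m p u
      have hrest : n - (R.1.length : Int) = (r : Int) := by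
        rw [hlen1, ← hNn]
        omega
      have hfullI : PySem.Int.floordiv (n - (R.1.length : Int)) (c.length : Int) = ((r / p : Nat) : Int) := by
        rw [hrest, hclen]
        exact PySem.Int.floordiv_natCast r p
      have hremI : PySem.Int.mod (n - (R.1.length : Int)) (c.length : Int) = ((r % p : Nat) : Int) := by
        rw [hrest, hclen]
        exact PySem.Int.mod_natCast r p
      -- B in explicit form
      rw [pvAlt_break num_count n seed a b m R.1 R.2.1 R.2.2 hn hres hltn c hcyc0.symm
        ((r / p : Nat) : Int) ((r % p : Nat) : Int) hfullI.symm hremI.symm]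
      -- A in explicit form
      rw [hA, hstream, hrep, hrem_take, List.foldl_append, List.foldl_append, h1]
      rw [PySem.List.slice_to_natCast c (r % p)]
      -- it remains to identify the counting of the repeated cycles
      congr 1
      set F := (List.replicate (r / p) c).flatten with hF
      set d1 := (pvGen a b m k seed).foldl
        (fun d v => d.insert (PySem.Int.toStr v) (d.getD (PySem.Int.toStr v) 0 + 1)) D0 with hd1
      congr 1
      -- d2 = counting F one by one
      have hmemc : ∀ v ∈ c, v ∈ pvGen a b m k seed := by
        intro v hv
        rw [← hdrop] at hv
        exact List.mem_of_mem_drop hv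
      have hcontains : ∀ v, v ∈ c → d1.contains (PySem.Int.toStr v) = true := by
        intro v hv
        rw [PySem.Dict.contains_iff_mem_keys, hd1,
          PySem.Dict.keys_foldl_insert_key (pvGen a b m k seed) PySem.Int.toStr
            (fun d v => d.getD (PySem.Int.toStr v) 0 + 1) D0,
          PySem.Set.mem_update]
        exact Or.inr (List.mem_map_of_mem (hmemc v hv))
      have hcF : ∀ x ∈ F, d1.contains (PySem.Int.toStr x) = true := by
        intro x hx
        rw [hF, List.mem_flatten] at hx
        obtain ⟨l, hl, hxl⟩ := hx
        rw [List.mem_replicate] at hl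
        exact hcontains x (hl.2 ▸ hxl)
      have hcnt : c.foldl (fun d v => d.insert v (d.getD v 0 + 1)) (PySem.Dict.empty : PySem.Dict Int Int)
          = PySem.Dict.counter c := PySem.Dict.foldl_insert_getD_add_one_eq_counter c
      have hcI : ∀ q ∈ (PySem.Dict.counter c).items, d1.contains (PySem.Int.toStr q.1) = true := by
        intro q hq
        rw [PySem.Dict.items_counter] at hq
        obtain ⟨v, hv, rfl⟩ := List.mem_map.mp hq
        exact hcontains v ((PySem.Set.mem_ofList c v).mp hv)
      have E1 : (F.foldl (fun d v => d.insert (PySem.Int.toStr v) (d.getD (PySem.Int.toStr v) 0 + 1)) d1).items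
          = d1.items.map (fun q => (q.1, q.2 +
              ((F.filter (fun x => PySem.Int.toStr x == q.1)).map (fun _ => (1:Int))).sum)) :=
        pvFold_insert_items PySem.Int.toStr (fun _ => (1:Int)) F d1 hnd1 hcF
      have E2 : ((PySem.Dict.counter c).items.foldl
            (fun d q => d.insert (PySem.Int.toStr q.1)
              (d.getD (PySem.Int.toStr q.1) 0 + ((r / p : Nat) : Int) * q.2)) d1).items
          = d1.items.map (fun q => (q.1, q.2 +
              (((PySem.Dict.counter c).items.filter (fun x => PySem.Int.toStr x.1 == q.1)).map
                (fun x => ((r / p : Nat) : Int) * x.2)).sum)) :=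
        pvFold_insert_items (fun x : Int × Int => PySem.Int.toStr x.1)
          (fun x : Int × Int => ((r / p : Nat) : Int) * x.2) (PySem.Dict.counter c).items d1 hnd1 hcI
      have hkey : ∀ kk : String,
          (((PySem.Dict.counter c).items.filter (fun x => PySem.Int.toStr x.1 == kk)).map
            (fun x => ((r / p : Nat) : Int) * x.2)).sum
          = ((F.filter (fun x => PySem.Int.toStr x == kk)).map (fun _ => (1:Int))).sum := by
        intro kk
        -- right side: the plain count of kk among the stringified cycle repetitions
        have hrhs : ((F.filter (fun x => PySem.Int.toStr x == kk)).map (fun _ => (1:Int))).sum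
            = (((F.map PySem.Int.toStr).count kk : Nat) : Int) := by
          rw [List.map_const', List.sum_replicate, List.count_eq_countP, List.countP_map]
          simp [List.countP_eq_length_filter, Function.comp_def]
        have hFmap : F.map PySem.Int.toStr = (List.replicate (r / p) (c.map PySem.Int.toStr)).flatten := by
          rw [hF, List.map_flatten, List.map_replicate]
        have hcountF : (F.map PySem.Int.toStr).count kk = (r / p) * ((c.map PySem.Int.toStr).count kk) := by
          rw [hFmap, pvCount_flatten_replicate]
        -- left side: group by distinct cycle values
        have hlhs : (((PySem.Dict.counter c).items.filter (fun x => PySem.Int.toStr x.1 == kk)).map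
              (fun x => ((r / p : Nat) : Int) * x.2)).sum
            = ((r / p : Nat) : Int) *
              (((PySem.Set.ofList c).filter (fun v => PySem.Int.toStr v == kk)).map
                (fun v => (c.count v : Int))).sum := by
          rw [PySem.Dict.items_counter, List.filter_map, List.map_map]
          rw [← List.sum_map_mul_left]
          rfl
        rw [hlhs, hrhs, hcountF]
        rw [pvSum_counts PySem.Int.toStr (PySem.Set.ofList c) (PySem.Set.nodup_ofList c) c
          (fun x hx => (PySem.Set.mem_ofList c x).mpr hx) kk]
        push_cast
        ring
      rw [hcnt]
      apply PySem.Dict.ext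
      rw [E1, E2]
      apply List.map_congr_left
      intro q _
      rw [hkey q.1]
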